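-- pv_equiv track=rewrite | github.com/ruizsugliani/Algoritmos-1-Essaya | PARCIALITOS/P4/generador_recursion.py | wrapper
-- ===== SOURCE A (Python) =====
-- def es_primo(n):
--     '''
--     Devuelve true si es un numero primo, false en caso contrario
--     '''
--     for i in range(2, n):
--         if (n % i) == 0:
--         	return False
--     return True
--
-- def wrapper(lista, res):
--     if len(lista) == 1:
--         res.append(lista[0])
--         return res
--     siguiente_dato = lista[1]
--     if es_primo(siguiente_dato):
--         return wrapper(lista[1:], res)
--     res.append(lista[0])
--     return wrapper(lista[1:], res)
-- ===== SOURCE B (Python) =====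
-- def es_primo(n):
--     '''
--     Devuelve true si es un numero primo, false en caso contrario
--     '''
--     for i in range(2, n):
--         if (n % i) == 0:
--             return False
--     return True
--
-- def wrapper(lista, res):
--     res.extend(a for a, b in zip(lista, lista[1:]) if not es_primo(b))
--     res.append(lista[-1])
--     return res
-- ===== Notes on version B (the rewrite author's own statement) =====
-- stated objective: idiomatic
-- what changed: Replaced the tail recursion on successive list suffixes with a single zip(lista, lista[1:]) pairing filtered by the prime test and extended onto res, followed by appending the last element.
import Mathlib
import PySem

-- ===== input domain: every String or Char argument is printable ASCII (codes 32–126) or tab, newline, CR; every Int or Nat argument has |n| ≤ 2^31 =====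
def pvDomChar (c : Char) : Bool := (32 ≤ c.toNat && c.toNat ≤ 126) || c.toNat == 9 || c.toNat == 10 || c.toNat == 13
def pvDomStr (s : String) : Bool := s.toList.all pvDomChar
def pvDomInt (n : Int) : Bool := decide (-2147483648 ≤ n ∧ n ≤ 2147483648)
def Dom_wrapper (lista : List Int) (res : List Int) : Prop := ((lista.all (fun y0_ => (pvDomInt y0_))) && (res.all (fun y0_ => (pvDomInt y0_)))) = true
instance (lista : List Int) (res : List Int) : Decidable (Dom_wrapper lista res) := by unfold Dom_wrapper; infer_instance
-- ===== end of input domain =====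

-- B replaces A's suffix recursion by one zip-filter pass plus appending the last element (idiomatic, not faster).
-- A mutates res in place (append); the equivalence proved here is about the RETURN value only.
-- ===== PORT A =====
-- shared helper: both Source A and Source B contain this identical es_primo.
-- 'for i in range(2, n): if n % i == 0: return False' with the early return kept (short-circuit loop, no list built)
-- fuel = number of remaining loop iterations (range(2, n) has (n-2).toNat steps); structural, early return kept
def es_primo_loop (n : Int) : Nat → Int → Bool
  | 0, _ => true
  | fuel + 1, i => if PySem.Int.mod n i == 0 then false else es_primo_loop n fuel (i + 1)

def es_primo (n : Int) : Bool := es_primo_loop n (n - 2).toNat 2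

def wrapper (lista : List Int) (res : List Int) : List Int :=
  match lista with
  | [] => res            -- unreachable under Pre_wrapper: Python raises IndexError at lista[1]
  | [x] => res ++ [x]    -- len(lista) == 1: res.append(lista[0]); return res
  | x :: y :: rest =>    -- siguiente_dato = lista[1] = y; lista[1:] = y :: rest
    if es_primo y then wrapper (y :: rest) res
    else wrapper (y :: rest) (res ++ [x])
termination_by structural lista

-- ===== PORT B =====
def wrapper_alt (lista : List Int) (res : List Int) : List Int :=
  (res ++ ((lista.zip (PySem.List.slice lista (some 1) none)).filter
      (fun p => !es_primo p.2)).map (fun p => p.1))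
    ++ [PySem.List.pyGetD lista (-1) 0]   -- lista[-1]; in range under Pre_wrapper

-- ===== PRECONDITION & SPEC =====
-- Pre_ excludes only the empty list, on which both Pythons raise IndexError.
def Pre_wrapper (lista : List Int) (res : List Int) : Prop := lista ≠ []
instance (lista : List Int) (res : List Int) : Decidable (Pre_wrapper lista res) := by unfold Pre_wrapper; infer_instance
def pvWitness_wrapper : List Int × List Int := ([4, 5, 6], [9])

def Spec_wrapper (lista : List Int) (res : List Int) (out : List Int) : Prop := out = wrapper_alt lista res
instance (lista : List Int) (res : List Int) (out : List Int) : Decidable (Spec_wrapper lista res out) := by unfold Spec_wrapper; infer_instance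

-- ===== CLAIM (what is proved, stated in full; the proofs are below) =====
def Claim_equal_wrapper : Prop := ∀ (lista : List Int) (res : List Int), Dom_wrapper lista res → Pre_wrapper lista res → Spec_wrapper lista res (wrapper lista res)

-- ===== LEMMAS AND PROOFS =====

lemma slice_one_drop (xs : List Int) :
    PySem.List.slice xs (some 1) none = xs.drop 1 := by
  have := PySem.List.slice_from_natCast (xs := xs) (a := 1)
  simpa using this

-- B's loop unrolled one step on a list with at least two elements
lemma wrapper_alt_cons_cons (x y : Int) (rest res : List Int) :
    wrapper_alt (x :: y :: rest) res =
      if es_primo y then wrapper_alt (y :: rest) res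
      else wrapper_alt (y :: rest) (res ++ [x]) := by
  have hlast : PySem.List.pyGetD (x :: y :: rest) (-1) 0 =
      PySem.List.pyGetD (y :: rest) (-1) 0 := by
    rw [PySem.List.pyGetD_neg_one (x :: y :: rest) 0 (by simp),
        PySem.List.pyGetD_neg_one (y :: rest) 0 (by simp)]
    exact List.getLast_cons (by simp)
  simp only [wrapper_alt, slice_one_drop, List.drop_one, List.tail_cons,
    List.zip_cons_cons, List.filter_cons, hlast]
  by_cases hp : es_primo y <;> simp [hp]

lemma wrapper_eq_alt : ∀ (lista : List Int), lista ≠ [] →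
    ∀ (res : List Int), wrapper lista res = wrapper_alt lista res := by
  intro lista
  induction lista with
  | nil => intro h; exact absurd rfl h
  | cons x t ih =>
    intro _ res
    cases t with
    | nil =>
      simp [wrapper, wrapper_alt, slice_one_drop, PySem.List.pyGetD_neg_one ([x]) 0 (by simp)]
    | cons y rest =>
      rw [wrapper_alt_cons_cons]
      simp only [wrapper]
      by_cases hp : es_primo y <;>
        simp [hp, ih (by simp)]

-- ===== VERDICT (by name: the statement is the Claim_ definition above) =====
theorem wrapper_spec : Claim_equal_wrapper := by
  intro lista res _ hpre
  unfold Spec_wrapper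
  exact wrapper_eq_alt lista hpre res
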